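-- pv_equiv track=rewrite | github.com/JJOL/maas-experiment | src/datagen/ds_editdistance.py | file_tokens
-- ===== SOURCE A (Python) =====
-- def file_tokens(content: str):
--     lines = content.split('\n')
--     lines = lines[0:800]
--     tokens = []
--     for l in lines:
--         for x in l.split(','):
--             tokens.append(x)
--     return tokens
-- ===== SOURCE B (Python) =====
-- def file_tokens(content: str):
--     # Single character-level scan (state machine): build each token char by
--     # char, close it on ',' or '\n', and stop after the 800th newline.
--     tokens = []
--     cur = []
--     nl = 0
--     for ch in content:
--         if ch == '\n':
--             nl += 1
--             tokens.append(''.join(cur))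
--             cur = []
--             if nl == 800:
--                 return tokens
--         elif ch == ',':
--             tokens.append(''.join(cur))
--             cur = []
--         else:
--             cur.append(ch)
--     tokens.append(''.join(cur))
--     return tokens
-- ===== Notes on version B (the rewrite author's own statement) =====
-- stated objective: alternative
-- what changed: Replaces A's split-into-lines-then-nested-split-and-append with a single character-level state machine that builds each token char by char, closes it at each comma or newline, and returns early at the 800th newline.
import Mathlib
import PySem

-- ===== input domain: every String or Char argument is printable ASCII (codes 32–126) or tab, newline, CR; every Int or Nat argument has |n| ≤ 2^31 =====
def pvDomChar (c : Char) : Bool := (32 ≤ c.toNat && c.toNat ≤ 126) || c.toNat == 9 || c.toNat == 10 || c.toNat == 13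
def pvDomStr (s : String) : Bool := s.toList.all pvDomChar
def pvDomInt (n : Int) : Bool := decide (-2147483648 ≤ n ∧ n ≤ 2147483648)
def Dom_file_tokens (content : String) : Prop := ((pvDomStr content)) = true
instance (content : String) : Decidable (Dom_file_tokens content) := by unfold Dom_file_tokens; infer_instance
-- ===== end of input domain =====

-- B replaces A's split-then-nested-loop tokenizer by one character-level scan
-- (state machine: current token, newline count, early stop at 800); objective: alternative.

-- str.split(sep) for a literal nonempty sep (exact: PySem.Chars.splitOn is exact for sep ≠ "")
def strSplit (s sep : String) : List String :=
  (PySem.Chars.splitOn s.toList sep.toList).map String.ofList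

-- ===== PORT A =====
def file_tokens (content : String) : List String :=
  let lines := strSplit content "\n"
  let lines := PySem.List.slice lines (some 0) (some 800)
  let tokens : List String := []
  lines.foldl (fun tokens l =>
    (strSplit l ",").foldl (fun tokens x => tokens ++ [x]) tokens) tokens

-- ===== PORT B =====
-- the for-loop of Source B as structural recursion over the characters;
-- state = (cur, nl, tokens) exactly as in Source B; early return at nl = 800
def fileTokensScan : List Char → List Char → Nat → List String → List String
  | [], cur, _, tokens => tokens ++ [String.ofList cur]
  | ch :: rest, cur, nl, tokens =>
    if ch = '\n' then
      let nl' := nl + 1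
      let tokens' := tokens ++ [String.ofList cur]
      if nl' = 800 then tokens' else fileTokensScan rest [] nl' tokens'
    else if ch = ',' then fileTokensScan rest [] nl (tokens ++ [String.ofList cur])
    else fileTokensScan rest (cur ++ [ch]) nl tokens

def file_tokens_alt (content : String) : List String :=
  fileTokensScan content.toList [] 0 []

-- ===== PRECONDITION & SPEC =====
def Spec_file_tokens (content : String) (out : List String) : Prop := out = file_tokens_alt content
instance (content : String) (out : List String) : Decidable (Spec_file_tokens content out) := by unfold Spec_file_tokens; infer_instance

-- ===== CLAIM (what is proved, stated in full; the proofs are below) =====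
def Claim_equal_file_tokens : Prop := ∀ (content : String), Dom_file_tokens content → Spec_file_tokens content (file_tokens content)

-- ===== LEMMAS AND PROOFS =====

-- structural characterisation of single-character splitOn
def sp (c : Char) : List Char → List (List Char)
  | [] => [[]]
  | d :: rest => if d = c then [] :: sp c rest else (sp c rest).modifyHead (d :: ·)

theorem sp_ne_nil (c : Char) (l : List Char) : sp c l ≠ [] := by
  cases l with
  | nil => simp [sp]
  | cons d rest =>
    simp only [sp]
    split
    · simp
    · intro h
      have := sp_ne_nil c rest
      cases hsp : sp c rest with
      | nil => exact this hsp
      | cons a as => rw [hsp] at h; simp [List.modifyHead] at h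

theorem go_eq (c : Char) : ∀ (fuel : Nat) (l cur : List Char) (acc : List (List Char)),
    l.length < fuel →
    PySem.Chars.splitOn.go [c] fuel l cur acc
      = acc.reverse ++ (sp c l).modifyHead (cur.reverse ++ ·) := by
  intro fuel
  induction fuel with
  | zero => intro l cur acc h; omega
  | succ n ih =>
    intro l cur acc h
    cases l with
    | nil => simp [PySem.Chars.splitOn.go, sp]
    | cons d rest =>
      by_cases hdc : d = c
      · have hpre : List.isPrefixOf [c] (d :: rest) = true := by
          simp [List.isPrefixOf, hdc]
        rw [show PySem.Chars.splitOn.go [c] (n+1) (d :: rest) cur acc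
              = PySem.Chars.splitOn.go [c] n (List.drop 1 (d :: rest)) [] (cur.reverse :: acc) by
            simp [PySem.Chars.splitOn.go, hpre]]
        simp only [List.drop_succ_cons, List.drop_zero]
        rw [ih rest [] (cur.reverse :: acc) (by simpa using Nat.lt_of_succ_lt_succ h)]
        simp only [sp, if_pos hdc]
        have : (sp c rest).modifyHead (List.nil.reverse ++ ·) = sp c rest := by
          cases hsp : sp c rest with
          | nil => rfl
          | cons a as => simp [List.modifyHead]
        rw [this]
        simp [List.modifyHead]
      · have hpre : List.isPrefixOf [c] (d :: rest) = false := by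
          simp [List.isPrefixOf]
          exact fun hh => absurd hh.symm hdc
        rw [show PySem.Chars.splitOn.go [c] (n+1) (d :: rest) cur acc
              = PySem.Chars.splitOn.go [c] n rest (d :: cur) acc by
            simp [PySem.Chars.splitOn.go, hpre]]
        rw [ih rest (d :: cur) acc (by simpa using Nat.lt_of_succ_lt_succ h)]
        simp only [sp, if_neg hdc, List.modifyHead_modifyHead]
        have : (fun x => (d :: cur).reverse ++ x) = ((fun x => cur.reverse ++ x) ∘ fun x => d :: x) := by
          funext x; simp
        rw [this]

theorem splitOn_eq_sp (c : Char) (l : List Char) :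
    PySem.Chars.splitOn l [c] = sp c l := by
  unfold PySem.Chars.splitOn
  rw [go_eq c (l.length + 1) l [] [] (by omega)]
  cases hsp : sp c l with
  | nil => exact absurd hsp (sp_ne_nil c l)
  | cons a as => simp [List.modifyHead]

theorem modifyHead_append_left {α : Type} (f : α → α) (xs ys : List α) (h : xs ≠ []) :
    (xs ++ ys).modifyHead f = xs.modifyHead f ++ ys := by
  cases xs with
  | nil => exact absurd rfl h
  | cons a as => simp [List.modifyHead]

theorem modifyHead_nil_append {α : Type} (l : List (List α)) :
    l.modifyHead (fun x => [] ++ x) = l := by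
  cases l with
  | nil => rfl
  | cons a as => simp [List.modifyHead]

-- the scan invariant: with nl newlines already consumed, fileTokensScan emits the
-- comma-tokens of the first (800 - nl) '\n'-pieces of the remaining input, the
-- first token prefixed by the pending cur
theorem scan_eq : ∀ (l cur : List Char) (nl : Nat) (tokens : List String), nl < 800 →
    fileTokensScan l cur nl tokens
      = tokens ++ ((((sp '\n' l).take (800 - nl)).flatMap (sp ',')).modifyHead
          (fun x => cur ++ x)).map String.ofList := by
  intro l
  induction l with
  | nil =>
    intro cur nl tokens h
    obtain ⟨m, hm⟩ : ∃ m, 800 - nl = m + 1 := ⟨800 - nl - 1, by omega⟩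
    simp [fileTokensScan, sp, hm, List.flatMap, List.modifyHead]
  | cons ch rest ih =>
    intro cur nl tokens h
    obtain ⟨m, hm⟩ : ∃ m, 800 - nl = m + 1 := ⟨800 - nl - 1, by omega⟩
    obtain ⟨p, ps, hps⟩ : ∃ p ps, sp '\n' rest = p :: ps := by
      cases hsp : sp '\n' rest with
      | nil => exact absurd hsp (sp_ne_nil _ _)
      | cons a as => exact ⟨a, as, rfl⟩
    by_cases hn : ch = '\n'
    · subst hn
      have hspc : sp '\n' ('\n' :: rest) = [] :: sp '\n' rest := by simp [sp]
      rw [hspc, hm, List.take_succ_cons, List.flatMap_cons,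
        show sp ',' ([] : List Char) = [[]] from by simp [sp]]
      by_cases h800 : nl + 1 = 800
      · rw [show fileTokensScan ('\n' :: rest) cur nl tokens
            = tokens ++ [String.ofList cur] from by simp [fileTokensScan, h800]]
        have hm0 : m = 0 := by omega
        subst hm0
        simp [List.modifyHead]
      · rw [show fileTokensScan ('\n' :: rest) cur nl tokens
            = fileTokensScan rest [] (nl + 1) (tokens ++ [String.ofList cur]) from by
          simp [fileTokensScan, h800]]
        rw [ih [] (nl + 1) _ (by omega), modifyHead_nil_append,
          show 800 - (nl + 1) = m from by omega]
        simp [List.modifyHead]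
    · by_cases hc : ch = ','
      · subst hc
        have hspc : sp '\n' (',' :: rest) = (',' :: p) :: ps := by
          simp [sp, hn, hps, List.modifyHead]
        rw [show fileTokensScan (',' :: rest) cur nl tokens
            = fileTokensScan rest [] nl (tokens ++ [String.ofList cur]) from by
          simp [fileTokensScan, hn]]
        rw [ih [] nl _ h, modifyHead_nil_append, hm, hps, List.take_succ_cons,
          List.flatMap_cons, hspc, List.take_succ_cons, List.flatMap_cons,
          show sp ',' (',' :: p) = [] :: sp ',' p from by simp [sp]]
        simp [List.modifyHead]
      · have hspc : sp '\n' (ch :: rest) = (ch :: p) :: ps := by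
          simp [sp, hn, hps, List.modifyHead]
        rw [show fileTokensScan (ch :: rest) cur nl tokens
            = fileTokensScan rest (cur ++ [ch]) nl tokens from by
          simp [fileTokensScan, hn, hc]]
        rw [ih (cur ++ [ch]) nl tokens h, hm, hps, List.take_succ_cons,
          List.flatMap_cons, hspc, List.take_succ_cons, List.flatMap_cons,
          show sp ',' (ch :: p) = (sp ',' p).modifyHead (ch :: ·) from by simp [sp, hc]]
        have hne : (sp ',' p).modifyHead (ch :: ·) ≠ [] := by
          cases hq : sp ',' p with
          | nil => exact absurd hq (sp_ne_nil _ _)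
          | cons a as => simp [List.modifyHead]
        rw [modifyHead_append_left _ _ _ (sp_ne_nil ',' p),
          modifyHead_append_left _ _ _ hne, List.modifyHead_modifyHead]
        have : ((fun x => cur ++ x) ∘ fun x => ch :: x) = (fun x => cur ++ [ch] ++ x) := by
          funext x; simp
        rw [this]

-- ===== VERDICT (by name: the statement is the Claim_ definition above) =====
theorem file_tokens_spec : Claim_equal_file_tokens := by
  intro content _
  unfold Spec_file_tokens file_tokens file_tokens_alt strSplit
  have hfold : ∀ (ts xs : List String), xs.foldl (fun t x => t ++ [x]) ts = ts ++ xs := by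
    intro ts xs
    rw [PySem.List.foldl_append_eq_flatMap]
    simp
  have hc : (",": String).toList = [','] := by decide
  have hn : ("\n": String).toList = ['\n'] := by decide
  set L := PySem.Chars.splitOn content.toList ("\n".toList) with hLdef
  have hslice : PySem.List.slice (L.map String.ofList) (some 0) (some 800)
      = (L.map String.ofList).take 800 := by
    have h := PySem.List.slice_natCast (L.map String.ofList) 0 800
    simpa using h
  rw [scan_eq content.toList [] 0 [] (by omega), modifyHead_nil_append]
  simp only [hfold, hslice, PySem.List.foldl_append_eq_flatMap, List.nil_append,
    ← List.map_take, List.flatMap_map,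
    String.toList_ofList, hc, splitOn_eq_sp]
  rw [hn, splitOn_eq_sp] at hLdef
  rw [hLdef]
  simp [List.map_flatMap]
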